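-- pv_equiv track=rewrite | github.com/malyushkin/cs-labs | python/greedy-terms.py | find_k_terms
-- ===== SOURCE A (Python) =====
-- def find_k_terms(n):
--     if n == 1 or n == 2:
--         return [n]
--
--     terms = list()
--     part = 1
--     while n-part > part:
--         terms.append(part)
--         n -= part
--         part += 1
--     terms.append(n)
--     return(terms)
-- ===== SOURCE B (Python) =====
-- def find_k_terms(n):
--     if n < 3:
--         return [n]
--     # largest k >= 0 with k*(k+3) < 2*n, by binary search on [0, n]
--     lo, hi = 0, n
--     while lo < hi:
--         mid = (lo + hi + 1) // 2
--         if mid * (mid + 3) < 2 * n: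
--             lo = mid
--         else:
--             hi = mid - 1
--     k = lo
--     return list(range(1, k + 1)) + [n - k * (k + 1) // 2]
-- ===== Notes on version B (the rewrite author's own statement) =====
-- stated objective: alternative
-- what changed: Replaces A's incremental while-loop that repeatedly subtracts and grows the part by a closed-form construction: binary-search the cutoff k (largest k with k*(k+3) < 2n), then emit range(1,k+1) plus the remainder n - k*(k+1)//2.
import Mathlib
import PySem

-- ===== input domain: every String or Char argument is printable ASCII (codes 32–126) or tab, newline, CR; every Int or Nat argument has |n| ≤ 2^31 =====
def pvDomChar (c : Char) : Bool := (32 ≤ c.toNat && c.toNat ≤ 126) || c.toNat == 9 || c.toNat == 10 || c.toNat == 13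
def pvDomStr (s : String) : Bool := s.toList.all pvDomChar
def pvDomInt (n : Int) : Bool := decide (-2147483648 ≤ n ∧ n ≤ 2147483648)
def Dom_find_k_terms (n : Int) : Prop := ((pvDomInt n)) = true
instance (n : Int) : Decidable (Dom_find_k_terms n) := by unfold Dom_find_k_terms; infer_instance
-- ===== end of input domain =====

-- B replaces A's incremental subtract-and-grow loop by a binary search for the
-- cutoff k followed by a direct construction range(1,k+1) ++ [remainder].

-- ===== PORT A =====
-- the while loop of A, carrying (terms, n, part)
def findALoop (terms : List Int) (n : Int) (part : Int) : List Int :=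
  if h : n - part > part then
    findALoop (terms ++ [part]) (n - part) (part + 1)
  else
    terms ++ [n]
termination_by ((1 - part).toNat, (n - 2 * part).toNat)
decreasing_by
  by_cases hp : part ≤ 0
  · exact Prod.Lex.left _ _ (by omega)
  · have h1 : (1 - (part + 1)).toNat = 0 := by omega
    have h2 : (1 - part).toNat = 0 := by omega
    rw [h1, h2]
    exact Prod.Lex.right 0 (by omega)

def find_k_terms (n : Int) : List Int :=
  if n = 1 ∨ n = 2 then [n]
  else findALoop [] n 1

-- ===== PORT B =====
-- the binary-search while loop of B, carrying (lo, hi)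
def findBSearch (n lo hi : Int) : Int :=
  if h : lo < hi then
    let mid := PySem.Int.floordiv (lo + hi + 1) 2
    if mid * (mid + 3) < 2 * n then findBSearch n mid hi
    else findBSearch n lo (mid - 1)
  else lo
termination_by (hi - lo).toNat
decreasing_by
  all_goals
    have hb := PySem.Int.floordiv_two_mid_bounds (lo := lo + 1) (hi := hi) (by omega)
    have he : lo + 1 + hi = lo + hi + 1 := by ring
    rw [he] at hb
    omega

def find_k_terms_alt (n : Int) : List Int :=
  if n < 3 then [n]
  else
    let k := findBSearch n 0 n
    PySem.List.pyRange 1 (k + 1) 1 ++ [n - PySem.Int.floordiv (k * (k + 1)) 2]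

-- ===== PRECONDITION & SPEC =====
def Spec_find_k_terms (n : Int) (out : List Int) : Prop := out = find_k_terms_alt n
instance (n : Int) (out : List Int) : Decidable (Spec_find_k_terms n out) := by unfold Spec_find_k_terms; infer_instance

-- ===== CLAIM (what is proved, stated in full; the proofs are below) =====
def Claim_equal_find_k_terms : Prop := ∀ (n : Int), Dom_find_k_terms n → Spec_find_k_terms n (find_k_terms n)

-- ===== LEMMAS AND PROOFS =====

-- condA n p j : the loop guard of A holds at iteration j when started from (n, p)
def condA : Int → Int → Nat → Prop
  | n, p, 0 => n - p > p
  | n, p, j + 1 => condA (n - p) (p + 1) j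

theorem condA_iff (j : Nat) : ∀ (n p : Int),
    condA n p j ↔ 2 * n > 2 * (j : Int) * p + (j : Int) * ((j : Int) - 1) + 4 * (p + (j : Int)) := by
  induction j with
  | zero => intro n p; simp [condA]; constructor <;> intro h <;> omega
  | succ j ih =>
    intro n p
    show condA (n - p) (p + 1) j ↔ _
    rw [ih]
    have key : 2 * (n - p) - (2 * (j : Int) * (p + 1) + (j : Int) * ((j : Int) - 1) + 4 * ((p + 1) + (j : Int)))
        = 2 * n - (2 * ((j : Int) + 1) * p + ((j : Int) + 1) * (((j : Int) + 1) - 1) + 4 * (p + ((j : Int) + 1))) := by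
      ring
    push_cast
    constructor <;> intro h <;> linarith [key]

theorem loop_eq (t : Nat) : ∀ (n p : Int) (acc : List Int),
    (∀ j, j < t → condA n p j) → ¬ condA n p t →
    findALoop acc n p = acc ++ PySem.List.pyRange p (p + (t : Int)) 1
      ++ [n - (PySem.List.pyRange p (p + (t : Int)) 1).sum] := by
  induction t with
  | zero =>
    intro n p acc _ hnot
    have hg : ¬ (n - p > p) := hnot
    unfold findALoop; rw [dif_neg hg]
    simp [PySem.List.pyRange_one_eq_nil (le_refl p)]
  | succ t ih =>
    intro n p acc hall hnot
    have h0 : n - p > p := hall 0 (Nat.succ_pos t)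
    unfold findALoop; rw [dif_pos h0]
    have hrec := ih (n - p) (p + 1) (acc ++ [p])
      (fun j hj => hall (j + 1) (by omega)) hnot
    rw [hrec]
    have hcons : PySem.List.pyRange p (p + ((t : Int) + 1)) 1
        = p :: PySem.List.pyRange (p + 1) (p + ((t : Int) + 1)) 1 :=
      PySem.List.pyRange_one_cons (by omega)
    have harg : p + ((t : Int) + 1) = (p + 1) + (t : Int) := by ring
    push_cast
    rw [hcons, harg]
    simp [List.sum_cons]
    ring

theorem bsearch_correct (n : Int) : ∀ (lo hi : Int),
    0 ≤ lo → lo ≤ hi → lo * (lo + 3) < 2 * n → ¬ ((hi + 1) * (hi + 4) < 2 * n) →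
    0 ≤ findBSearch n lo hi ∧ findBSearch n lo hi * (findBSearch n lo hi + 3) < 2 * n
      ∧ ¬ ((findBSearch n lo hi + 1) * (findBSearch n lo hi + 4) < 2 * n) := by
  intro lo hi
  induction lo, hi using findBSearch.induct n with
  | case1 lo hi h mid hc ih =>
    intro h0 _ hlo hhi
    have hb := PySem.Int.floordiv_two_mid_bounds (lo := lo + 1) (hi := hi) (by omega)
    have he : lo + 1 + hi = lo + hi + 1 := by ring
    rw [he] at hb
    rw [findBSearch, dif_pos h, if_pos hc]
    exact ih (by omega) (by omega) hc hhi
  | case2 lo hi h mid hc ih =>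
    intro h0 _ hlo hhi
    have hb := PySem.Int.floordiv_two_mid_bounds (lo := lo + 1) (hi := hi) (by omega)
    have he : lo + 1 + hi = lo + hi + 1 := by ring
    rw [he] at hb
    rw [findBSearch, dif_pos h, if_neg hc]
    refine ih h0 (by omega) hlo ?_
    have : mid - 1 + 1 = mid := by ring
    rw [this]
    have : mid - 1 + 4 = mid + 3 := by ring
    rw [this]
    exact hc
  | case3 lo hi h =>
    intro h0 hle hlo hhi
    rw [findBSearch, dif_neg h]
    have : lo = hi := by omega
    exact ⟨h0, hlo, by rw [this]; exact hhi⟩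

theorem sum_pyRange_one (t : Nat) :
    2 * (PySem.List.pyRange 1 (1 + (t : Int)) 1).sum = (t : Int) * ((t : Int) + 1) := by
  induction t with
  | zero =>
    rw [show ((0:Nat):Int) = 0 by norm_num]
    rw [show (1:Int) + 0 = 1 by ring, PySem.List.pyRange_one_eq_nil (le_refl 1)]
    simp
  | succ t ih =>
    have hsplit : PySem.List.pyRange 1 (1 + ((t : Int) + 1)) 1
        = PySem.List.pyRange 1 (1 + (t : Int)) 1 ++ [1 + (t : Int)] := by
      have : (1 : Int) + ((t : Int) + 1) = (1 + (t : Int)) + 1 := by ring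
      rw [this]
      exact PySem.List.pyRange_one_succ_right (by omega)
    push_cast
    rw [hsplit, List.sum_append]
    push_cast at ih
    simp only [List.sum_cons, List.sum_nil]
    nlinarith [ih]

theorem find_k_terms_eq (n : Int) : find_k_terms n = find_k_terms_alt n := by
  by_cases hlt : n < 3
  · -- small case: both return [n]
    rw [find_k_terms_alt, if_pos hlt]
    by_cases h12 : n = 1 ∨ n = 2
    · rw [find_k_terms, if_pos h12]
    · rw [find_k_terms, if_neg h12]; unfold findALoop; rw [dif_neg (by omega : ¬ (n - 1 > 1))]
      simp
  · -- main case
    replace hlt : 3 ≤ n := by omega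
    have hk := bsearch_correct n 0 n (le_refl 0) (by omega) (by omega)
      (by intro h; nlinarith)
    set k := findBSearch n 0 n with hkdef
    obtain ⟨hk0, hk1, hk2⟩ := hk
    set t : Nat := k.toNat with htdef
    have htk : (t : Int) = k := Int.toNat_of_nonneg hk0
    have hall : ∀ j, j < t → condA n 1 j := by
      intro j hj
      rw [condA_iff]
      have hjk : (j : Int) + 1 ≤ k := by omega
      have hj0 : (0 : Int) ≤ (j : Int) := Int.natCast_nonneg j
      nlinarith [mul_nonneg (show (0:Int) ≤ k - ((j:Int)+1) by omega)
        (show (0:Int) ≤ k + ((j:Int)+1) + 3 by omega)]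
    have hnot : ¬ condA n 1 t := by
      rw [condA_iff]
      intro h
      have hid : 2 * (t : Int) * 1 + (t : Int) * ((t : Int) - 1) + 4 * (1 + (t : Int))
          = (k + 1) * (k + 4) := by rw [htk]; ring
      rw [hid] at h
      exact hk2 h
    have hA := loop_eq t n 1 [] hall hnot
    have hAe : find_k_terms n = findALoop [] n 1 := by
      rw [find_k_terms, if_neg (by omega)]
    have hS : PySem.Int.floordiv (k * (k + 1)) 2
        = (PySem.List.pyRange 1 (1 + (t : Int)) 1).sum := by
      have h2 : k * (k + 1) = 2 * (PySem.List.pyRange 1 (1 + (t : Int)) 1).sum := by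
        rw [sum_pyRange_one, htk]
      rw [h2, PySem.Int.floordiv_eq_ediv_of_pos (by norm_num)]
      exact Int.mul_ediv_cancel_left _ (by norm_num)
    have hB : find_k_terms_alt n = PySem.List.pyRange 1 (k + 1) 1
        ++ [n - PySem.Int.floordiv (k * (k + 1)) 2] := by
      rw [find_k_terms_alt, if_neg (by omega)]
    have hrng : k + 1 = 1 + (t : Int) := by omega
    rw [hAe, hA, hB, hS, hrng, List.nil_append]

-- ===== VERDICT (by name: the statement is the Claim_ definition above) =====
theorem find_k_terms_spec : Claim_equal_find_k_terms := by
  intro n _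
  exact find_k_terms_eq n
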